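-- pv_equiv track=rewrite | github.com/HayatoKTYM/prj-woz-e2m | utils/data_utils.py | add_positive_label
-- ===== SOURCE A (Python) =====
-- def add_positive_label(y):
--     y_after = [0]*len(y)
--     y_after = y.copy()
--     for i in range(len(y)):
--         if y[i] != 1: continue
--         for j in range(max(i-5,0),min(len(y),i+5)):
--             y_after[j] = 1
--     return y_after
-- ===== SOURCE B (Python) =====
-- def add_positive_label(y):
--     n = len(y)
--     return [1 if any(y[i] == 1 for i in range(max(j - 4, 0), min(n, j + 6))) else y[j]
--             for j in range(n)]
-- ===== Notes on version B (the rewrite author's own statement) =====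
-- stated objective: alternative
-- what changed: Replaces A's in-place writes of a window per input 1 with a pure per-position comprehension that scans each output index's fixed 10-element window; both are O(n) with a constant-size window.
import Mathlib
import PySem

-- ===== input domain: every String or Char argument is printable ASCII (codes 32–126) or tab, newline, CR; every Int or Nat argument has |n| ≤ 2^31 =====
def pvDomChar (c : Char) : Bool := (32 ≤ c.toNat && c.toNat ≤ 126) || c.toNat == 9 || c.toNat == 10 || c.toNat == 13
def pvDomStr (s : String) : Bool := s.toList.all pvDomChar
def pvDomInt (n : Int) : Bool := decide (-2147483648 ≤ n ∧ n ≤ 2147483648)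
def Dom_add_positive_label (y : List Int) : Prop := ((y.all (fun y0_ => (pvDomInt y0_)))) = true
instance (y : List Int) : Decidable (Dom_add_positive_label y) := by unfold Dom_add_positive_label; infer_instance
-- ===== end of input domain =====

-- B builds the output as a pure per-position map that scans each position's fixed ±window,
-- instead of A's in-place window writes per input 1; a different decomposition of the same O(n) task.

-- ===== PORT A =====
-- A-side helper: the body of A's outer for-loop (if y[i] != 1: continue; else write 1 over the window)
def outerStep (y : List Int) (acc : List Int) (i : Int) : List Int :=
  if PySem.List.pyGetD y i 0 ≠ 1 then acc
  else (PySem.List.pyRange (max (i - 5) 0) (min (y.length : Int) (i + 5)) 1).foldl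
    (fun acc2 j => PySem.List.pySetD acc2 j 1) acc

def add_positive_label (y : List Int) : List Int :=
  -- y_after = [0]*len(y); y_after = y.copy()
  let y_after := List.replicate y.length (0 : Int)
  let y_after := y
  (PySem.List.pyRange 0 (y.length : Int) 1).foldl (outerStep y) y_after

-- ===== PORT B =====
def add_positive_label_alt (y : List Int) : List Int :=
  let n : Int := y.length
  (PySem.List.pyRange 0 n 1).map (fun j =>
    if (PySem.List.pyRange (max (j - 4) 0) (min n (j + 6)) 1).any
        (fun i => PySem.List.pyGetD y i 0 == 1)
    then 1 else PySem.List.pyGetD y j 0)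

-- ===== PRECONDITION & SPEC =====
def Spec_add_positive_label (y : List Int) (out : List Int) : Prop := out = add_positive_label_alt y
instance (y : List Int) (out : List Int) : Decidable (Spec_add_positive_label y out) := by unfold Spec_add_positive_label; infer_instance

-- ===== CLAIM (what is proved, stated in full; the proofs are below) =====
def Claim_equal_add_positive_label : Prop := ∀ (y : List Int), Dom_add_positive_label y → Spec_add_positive_label y (add_positive_label y)

-- ===== LEMMAS AND PROOFS =====

-- inner loop of A: setting every index of pyRange a b 1 to 1
theorem setRange_getElem? (a b : Int) (ha : 0 ≤ a) (acc : List Int) (k : Nat) :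
    ((PySem.List.pyRange a b 1).foldl (fun acc2 j => PySem.List.pySetD acc2 j 1) acc)[k]? =
      if a ≤ (k : Int) ∧ (k : Int) < b ∧ k < acc.length then some 1 else acc[k]? := by
  generalize hn : (b - a).toNat = n
  induction n generalizing a acc with
  | zero =>
    rw [PySem.List.pyRange_one_eq_nil (by omega)]
    simp only [List.foldl_nil]
    rw [if_neg (by omega)]
  | succ n ih =>
    rw [PySem.List.pyRange_one_cons (by omega), List.foldl_cons]
    rw [ih (a + 1) (by omega) _ (by omega)]
    rw [PySem.List.pySetD_of_nonneg acc 1 ha, List.length_set]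
    by_cases hk : (k : Int) = a
    · have hkt : a.toNat = k := by omega
      by_cases hl : k < acc.length
      · rw [if_neg (by omega), if_pos (by omega), hkt,
          List.getElem?_set_self (by omega)]
      · rw [if_neg (by omega), if_neg (by omega)]
        have h1 : (acc.set a.toNat 1)[k]? = none :=
          List.getElem?_eq_none (by simp; omega)
        have h2 : acc[k]? = none := List.getElem?_eq_none (by omega)
        rw [h1, h2]
    · rw [List.getElem?_set_ne (by omega)]
      by_cases h1 : a + 1 ≤ (k : Int) ∧ (k : Int) < b ∧ k < acc.length
      · rw [if_pos h1, if_pos (by omega)]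
      · rw [if_neg h1, if_neg (by omega)]

-- A's outer loop, characterised pointwise
theorem outer_getElem? (y : List Int) (I : List Int) (acc : List Int) (k : Nat) :
    (I.foldl (outerStep y) acc)[k]? =
      if (∃ i ∈ I, PySem.List.pyGetD y i 0 = 1 ∧ max (i - 5) 0 ≤ (k : Int) ∧
            (k : Int) < min (y.length : Int) (i + 5) ∧ k < acc.length) then some 1
      else acc[k]? := by
  induction I generalizing acc with
  | nil => simp
  | cons i I ih =>
    rw [List.foldl_cons, ih]
    by_cases h : PySem.List.pyGetD y i 0 = 1
    · have hstep : outerStep y acc i =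
          (PySem.List.pyRange (max (i - 5) 0) (min (y.length : Int) (i + 5)) 1).foldl
            (fun acc2 j => PySem.List.pySetD acc2 j 1) acc := by
        unfold outerStep; rw [if_neg (by simp [h])]
      have hlen : (outerStep y acc i).length = acc.length := by
        rw [hstep]
        generalize hm : ((min (y.length : Int) (i + 5)) - (max (i - 5) 0)).toNat = m
        generalize hamax : max (i - 5) 0 = a
        rw [hamax] at hm
        clear hstep hamax
        induction m generalizing a acc with
        | zero =>
          rw [PySem.List.pyRange_one_eq_nil (by omega)]
          rfl
        | succ m ihm =>
          rw [PySem.List.pyRange_one_cons (by omega), List.foldl_cons]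
          rw [ihm _ _ (by omega), PySem.List.length_pySetD]
      rw [hlen, hstep, setRange_getElem? _ _ (by omega)]
      by_cases hA : (∃ i' ∈ I, PySem.List.pyGetD y i' 0 = 1 ∧ max (i' - 5) 0 ≤ (k : Int) ∧
            (k : Int) < min (y.length : Int) (i' + 5) ∧ k < acc.length)
      · rw [if_pos hA, if_pos (by obtain ⟨i', hi', hrest⟩ := hA; exact ⟨i', List.mem_cons_of_mem _ hi', hrest⟩)]
      · rw [if_neg hA]
        by_cases hB : max (i - 5) 0 ≤ (k : Int) ∧ (k : Int) < min (y.length : Int) (i + 5) ∧ k < acc.length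
        · rw [if_pos hB, if_pos ⟨i, List.mem_cons_self .., h, hB⟩]
        · rw [if_neg hB, if_neg ?_]
          rintro ⟨i', hi', h1, h2, h3, h4⟩
          rcases List.mem_cons.mp hi' with rfl | hm
          · exact hB ⟨h2, h3, h4⟩
          · exact hA ⟨i', hm, h1, h2, h3, h4⟩
    · have hstep : outerStep y acc i = acc := by unfold outerStep; rw [if_pos (by simp [h])]
      rw [hstep]
      congr 1
      apply propext
      constructor
      · rintro ⟨i', hi', hrest⟩; exact ⟨i', List.mem_cons_of_mem _ hi', hrest⟩
      · rintro ⟨i', hi', h1, hrest⟩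
        rcases List.mem_cons.mp hi' with rfl | hm
        · exact absurd h1 h
        · exact ⟨i', hm, h1, hrest⟩

-- ===== VERDICT (by name: the statement is the Claim_ definition above) =====
theorem add_positive_label_spec : Claim_equal_add_positive_label := by
  intro y _
  unfold Spec_add_positive_label add_positive_label add_positive_label_alt
  apply List.ext_getElem?
  intro k
  rw [outer_getElem?]
  by_cases hk : k < y.length
  · rw [List.getElem?_map, PySem.List.getElem?_pyRange_one,
      if_pos (show k < (((y.length : Int)) - 0).toNat by omega), Option.map_some]
    simp only [zero_add]
    have hget : ∀ (m : Nat) (hm : m < y.length),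
        PySem.List.pyGetD y (m : Int) 0 = y[m]'hm := by
      intro m hm
      rw [PySem.List.pyGetD_of_nonneg y 0 (by exact_mod_cast Int.natCast_nonneg m)]
      rw [show ((m : Int)).toNat = m from by omega, List.getD_eq_getElem _ _ hm]
    by_cases hc : ∃ i ∈ PySem.List.pyRange 0 (y.length : Int) 1,
        PySem.List.pyGetD y i 0 = 1 ∧ max (i - 5) 0 ≤ (k : Int) ∧
        (k : Int) < min (y.length : Int) (i + 5) ∧ k < y.length
    · rw [if_pos hc]
      obtain ⟨i, hi, h1, h2, h3, _⟩ := hc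
      rw [PySem.List.mem_pyRange_one] at hi
      have hany : ((PySem.List.pyRange (max ((k : Int) - 4) 0)
          (min (y.length : Int) ((k : Int) + 6)) 1).any
          (fun i => PySem.List.pyGetD y i 0 == 1)) = true := by
        simp only [List.any_eq_true]
        exact ⟨i, by rw [PySem.List.mem_pyRange_one]; omega, by simp [h1]⟩
      rw [if_pos hany]
    · rw [if_neg hc]
      have hany : ¬ ((PySem.List.pyRange (max ((k : Int) - 4) 0)
          (min (y.length : Int) ((k : Int) + 6)) 1).any
          (fun i => PySem.List.pyGetD y i 0 == 1)) = true := by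
        simp only [List.any_eq_true]
        rintro ⟨i, hi, hbeq⟩
        rw [PySem.List.mem_pyRange_one] at hi
        exact hc ⟨i, by rw [PySem.List.mem_pyRange_one]; omega,
          by simpa using hbeq, by omega, by omega, hk⟩
      rw [if_neg hany, List.getElem?_eq_getElem hk, hget k hk]
  · rw [if_neg (by omega), List.getElem?_eq_none (by omega),
      List.getElem?_eq_none (by simp [PySem.List.length_pyRange_one]; omega)]
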